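-- pv_equiv track=rewrite | github.com/Juless89/tutorials-aoc | part_2/main.py | part_1
-- ===== SOURCE A (Python) =====
-- def part_1(lines):
--     # store results
--     results = {'2': 0, '3': 0}
--
--     # go over each line
--     for line in lines:
--         # store each character's count
--         count = {}
--
--         # check if c already in count
--         for c in line:
--             if c in count:
--                 count[c] += 1
--             else:
--                 count[c] = 1
--
--         # if 2/3 in values, statement is true
--         # increment with 1
--         results['2'] += 2 in count.values()
--         results['3'] += 3 in count.values()
--
--     # return amount of 2s * 3s
--     return results['2'] * results['3']
-- ===== SOURCE B (Python) =====
-- def part_1(lines):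
--     twos = 0
--     threes = 0
--     for line in lines:
--         chars = sorted(line)
--         n = len(chars)
--         runs = []
--         i = 0
--         while i < n:
--             j = i
--             while j < n and chars[j] == chars[i]:
--                 j += 1
--             runs.append(j - i)
--             i = j
--         twos += 2 in runs
--         threes += 3 in runs
--     return twos * threes
-- ===== Notes on version B (the rewrite author's own statement) =====
-- stated objective: alternative
-- what changed: Replaces the per-character hash-counter dict by a sort-then-scan: each line's characters are sorted and a single scan over runs of equal adjacent characters collects the run lengths, which replace the dict's values; no frequency dictionary is built.
import Mathlib
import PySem

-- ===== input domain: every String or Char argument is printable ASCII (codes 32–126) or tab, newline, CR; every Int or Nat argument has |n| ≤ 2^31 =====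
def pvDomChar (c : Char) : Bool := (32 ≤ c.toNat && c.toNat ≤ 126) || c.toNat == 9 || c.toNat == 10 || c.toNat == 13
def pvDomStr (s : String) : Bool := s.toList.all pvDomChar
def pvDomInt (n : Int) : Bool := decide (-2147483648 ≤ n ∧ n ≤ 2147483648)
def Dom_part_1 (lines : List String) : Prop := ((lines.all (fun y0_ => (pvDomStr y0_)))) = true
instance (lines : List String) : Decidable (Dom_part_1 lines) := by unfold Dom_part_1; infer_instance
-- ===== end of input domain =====

-- B replaces A's hash-counter dict by sort-then-scan: sort the line's characters
-- and collect the lengths of runs of equal adjacent characters (alternative; no dict).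

-- ===== PORT A =====
-- inner loop: build the per-character count dict exactly as A does
def pvCountDict (cs : List Char) : PySem.Dict Char Int :=
  cs.foldl (fun d c =>
    if d.contains c then d.insert c (d.getD c 0 + 1) else d.insert c 1)
    PySem.Dict.empty

def part_1 (lines : List String) : Int :=
  let results : PySem.Dict String Int := PySem.Dict.ofList [("2", 0), ("3", 0)]
  let results := lines.foldl (fun results line =>
    let count := pvCountDict line.toList
    let results := results.insert "2"
      (results.getD "2" 0 + (if (count.values).contains 2 then 1 else 0))
    let results := results.insert "3"
      (results.getD "3" 0 + (if (count.values).contains 3 then 1 else 0))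
    results) results
  results.getD "2" 0 * results.getD "3" 0

-- ===== PORT B =====
-- inner while: advance j over the run of characters equal to the run's first
-- character; returns the run's length and the remaining suffix
def pvTakeRun (c : Char) : List Char → Nat × List Char
  | [] => (0, [])
  | x :: xs =>
      if x = c then
        let r := pvTakeRun c xs
        (r.1 + 1, r.2)
      else (0, x :: xs)

theorem pvTakeRun_length_le (c : Char) (xs : List Char) :
    (pvTakeRun c xs).2.length ≤ xs.length := by
  induction xs with
  | nil => simp [pvTakeRun]
  | cons x xs ih =>
      simp only [pvTakeRun]
      split <;> simp <;> omega

-- outer while: scan the sorted characters run by run, appending each run length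
def pvRunLens : List Char → List Nat
  | [] => []
  | c :: rest =>
      let r := pvTakeRun c rest
      (r.1 + 1) :: pvRunLens r.2
termination_by cs => cs.length
decreasing_by
  simp only [List.length_cons]
  have := pvTakeRun_length_le c rest
  omega

def part_1_alt (lines : List String) : Int :=
  let acc := lines.foldl (fun (tt : Int × Int) line =>
    let chars := PySem.List.sorted line.toList (fun c => c) false
    let runs := pvRunLens chars
    (tt.1 + (if runs.contains 2 then 1 else 0),
     tt.2 + (if runs.contains 3 then 1 else 0))) (0, 0)
  acc.1 * acc.2

-- ===== PRECONDITION & SPEC =====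
def Spec_part_1 (lines : List String) (out : Int) : Prop := out = part_1_alt lines
instance (lines : List String) (out : Int) : Decidable (Spec_part_1 lines out) := by unfold Spec_part_1; infer_instance

-- ===== CLAIM (what is proved, stated in full; the proofs are below) =====
def Claim_equal_part_1 : Prop := ∀ (lines : List String), Dom_part_1 lines → Spec_part_1 lines (part_1 lines)

-- ===== LEMMAS AND PROOFS =====

-- has a character occurring exactly k times
def pvHasRep (k : Nat) (cs : List Char) : Bool :=
  cs.any (fun c => cs.count c == k)

-- A's branchy inner loop builds exactly Counter(line)
theorem pvCountDict_eq_counter (cs : List Char) :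
    pvCountDict cs = PySem.Dict.counter cs := by
  have hfun : (fun (d : PySem.Dict Char Int) c =>
      if d.contains c then d.insert c (d.getD c 0 + 1) else d.insert c 1)
      = (fun d c => d.insert c (d.getD c 0 + 1)) := by
    funext d c
    by_cases h : d.contains c
    · simp [h]
    · rw [PySem.Dict.getD_of_not_contains _ _ (by simpa using h)]
      simp [h]
  unfold pvCountDict
  rw [hfun, PySem.Dict.foldl_insert_getD_add_one_eq_counter]

-- membership of k in the values of Counter(cs) is the direct per-character test
theorem values_counter_contains (cs : List Char) (k : Nat) :
    ((PySem.Dict.counter cs).values).contains (k : Int) = pvHasRep k cs := by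
  rw [PySem.Dict.values_eq_map_keys _ (PySem.Dict.nodup_keys_counter cs) 0]
  simp only [PySem.Dict.keys_counter, PySem.Dict.getD_counter, pvHasRep]
  rw [Bool.eq_iff_iff]
  simp [PySem.Set.mem_ofList]

-- decomposition of a sorted list at its first run: the run is a replicate of the
-- head, the head does not reappear in the suffix, and the suffix stays sorted
theorem pvTakeRun_sorted (c : Char) (rest : List Char)
    (h : (c :: rest).Pairwise (· ≤ ·)) :
    rest = List.replicate (pvTakeRun c rest).1 c ++ (pvTakeRun c rest).2
    ∧ c ∉ (pvTakeRun c rest).2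
    ∧ (pvTakeRun c rest).2.Pairwise (· ≤ ·) := by
  induction rest with
  | nil => simp [pvTakeRun]
  | cons x xs ih =>
      rcases List.pairwise_cons.mp h with ⟨hc, hx⟩
      by_cases hxc : x = c
      · subst hxc
        obtain ⟨h1, h2, h3⟩ := ih (List.pairwise_cons.mpr
          ⟨fun y hy => hc y (List.mem_cons_of_mem x hy), (List.pairwise_cons.mp hx).2⟩)
        have e : pvTakeRun x (x :: xs) = ((pvTakeRun x xs).1 + 1, (pvTakeRun x xs).2) := by
          simp [pvTakeRun]
        rw [e]
        refine ⟨?_, h2, h3⟩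
        rw [List.replicate_succ, List.cons_append, ← h1]
      · have e : pvTakeRun c (x :: xs) = (0, x :: xs) := by
          simp [pvTakeRun, hxc]
        rw [e]
        refine ⟨by simp, ?_, hx⟩
        intro hmem
        rcases List.mem_cons.mp hmem with h' | h'
        · exact hxc h'.symm
        · have hcx : c ≤ x := hc x (by simp)
          have hxcle : x ≤ c := (List.pairwise_cons.mp hx).1 c h'
          exact hxc (le_antisymm hxcle hcx)

-- on a sorted list, the run lengths are exactly the multiplicities: k is a run
-- length iff some character occurs exactly k times
theorem runLens_contains_sorted (s : List Char) (hs : s.Pairwise (· ≤ ·)) (k : Nat) :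
    (pvRunLens s).contains k = pvHasRep k s := by
  induction s using pvRunLens.induct with
  | case1 => simp [pvRunLens, pvHasRep]
  | case2 c rest r ih =>
      obtain ⟨h1, h2, h3⟩ := pvTakeRun_sorted c rest hs
      have hr : r = pvTakeRun c rest := rfl
      rw [← hr] at h1 h2 h3
      have hcount_c : (c :: rest).count c = r.1 + 1 := by
        rw [h1]
        simp [List.count_cons, List.count_append, List.count_replicate,
          List.count_eq_zero_of_not_mem h2]
      have hcount_r : ∀ d ∈ r.2, (c :: rest).count d = r.2.count d := by
        intro d hd
        have hdc : d ≠ c := fun hh => h2 (hh ▸ hd)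
        rw [h1]
        simp [List.count_cons, List.count_append, List.count_replicate, hdc,
          Ne.symm hdc]
      have hrl : pvRunLens (c :: rest) = (r.1 + 1) :: pvRunLens r.2 := by
        rw [pvRunLens]
      rw [Bool.eq_iff_iff]
      simp only [hrl, List.contains_cons, pvHasRep, List.any_eq_true,
        beq_iff_eq, Bool.or_eq_true, ih (h3)]
      constructor
      · rintro (hk | hk)
        · exact ⟨c, by simp, by rw [hcount_c]; omega⟩
        · obtain ⟨d, hd, hdk⟩ := hk
          refine ⟨d, ?_, by rw [hcount_r d hd]; exact hdk⟩
          rw [h1]; simp [hd]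
      · rintro ⟨d, hd, hdk⟩
        by_cases hdc : d = c
        · subst hdc; left; rw [hcount_c] at hdk; omega
        · have hdr : d ∈ r.2 := by
            rw [h1] at hd
            rcases List.mem_cons.mp hd with h' | h'
            · exact absurd h' hdc
            · rcases List.mem_append.mp h' with h' | h'
              · exact absurd (List.eq_of_mem_replicate h') hdc
              · exact h'
          right
          exact ⟨d, hdr, by rw [← hcount_r d hdr]; exact hdk⟩

-- B's per-line test equals the per-character multiplicity test on the original line
theorem runLens_sorted_eq_hasRep (cs : List Char) (k : Nat) :
    (pvRunLens (PySem.List.sorted cs (fun c => c) false)).contains k = pvHasRep k cs := by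
  have hperm : (PySem.List.sorted cs (fun c => c) false).Perm cs :=
    PySem.List.sorted_perm cs _ false
  have hsorted : (PySem.List.sorted cs (fun c => c) false).Pairwise (· ≤ ·) := by
    simpa using PySem.List.sorted_pairwise cs (fun c => c)
  rw [runLens_contains_sorted _ hsorted k]
  unfold pvHasRep
  rw [Bool.eq_iff_iff]
  simp only [List.any_eq_true, beq_iff_eq]
  constructor
  · rintro ⟨d, hd, hk⟩
    exact ⟨d, hperm.mem_iff.mp hd, by rw [← hperm.count_eq]; exact hk⟩
  · rintro ⟨d, hd, hk⟩
    exact ⟨d, hperm.mem_iff.mpr hd, by rw [hperm.count_eq]; exact hk⟩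

-- A's outer loop accumulates the two countP's in the dict entries
theorem loopA (lines : List String) (d : PySem.Dict String Int) :
    (lines.foldl (fun results line =>
      let count := pvCountDict line.toList
      let results := results.insert "2"
        (results.getD "2" 0 + (if (count.values).contains 2 then 1 else 0))
      let results := results.insert "3"
        (results.getD "3" 0 + (if (count.values).contains 3 then 1 else 0))
      results) d).getD "2" 0
      = d.getD "2" 0 + (lines.countP (fun line => pvHasRep 2 line.toList) : Nat)
    ∧ (lines.foldl (fun results line =>
      let count := pvCountDict line.toList
      let results := results.insert "2"
        (results.getD "2" 0 + (if (count.values).contains 2 then 1 else 0))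
      let results := results.insert "3"
        (results.getD "3" 0 + (if (count.values).contains 3 then 1 else 0))
      results) d).getD "3" 0
      = d.getD "3" 0 + (lines.countP (fun line => pvHasRep 3 line.toList) : Nat) := by
  induction lines generalizing d with
  | nil => simp
  | cons line rest ih =>
    simp only [List.foldl_cons, List.countP_cons]
    obtain ⟨ih2, ih3⟩ := ih _
    rw [ih2, ih3]
    have hv : ∀ k : Nat, ((pvCountDict line.toList).values).contains (k : Int)
        = pvHasRep k line.toList := by
      intro k; rw [pvCountDict_eq_counter, values_counter_contains]
    have h2 := hv 2
    have h3 := hv 3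
    rw [show ((2:Nat):Int) = (2:Int) by norm_num] at h2
    rw [show ((3:Nat):Int) = (3:Int) by norm_num] at h3
    rw [h2, h3]
    simp only [PySem.Dict.getD_insert,
      show (("2":String) = "3") = False by decide,
      show (("3":String) = "2") = False by decide, if_false]
    constructor <;> · split_ifs <;> push_cast <;> ring

-- B's outer loop accumulates the same two countP's in the pair
theorem loopB (lines : List String) (a b : Int) :
    lines.foldl (fun (tt : Int × Int) line =>
      let chars := PySem.List.sorted line.toList (fun c => c) false
      let runs := pvRunLens chars
      (tt.1 + (if runs.contains 2 then 1 else 0),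
       tt.2 + (if runs.contains 3 then 1 else 0))) (a, b)
      = (a + (lines.countP (fun line => pvHasRep 2 line.toList) : Nat),
         b + (lines.countP (fun line => pvHasRep 3 line.toList) : Nat)) := by
  induction lines generalizing a b with
  | nil => simp
  | cons line rest ih =>
    simp only [List.foldl_cons, List.countP_cons, ih,
      runLens_sorted_eq_hasRep line.toList 2, runLens_sorted_eq_hasRep line.toList 3]
    rw [Prod.mk.injEq]
    constructor <;> · split_ifs <;> push_cast <;> ring

-- ===== VERDICT (by name: the statement is the Claim_ definition above) =====
theorem part_1_spec : Claim_equal_part_1 := by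
  intro lines _
  obtain ⟨h2, h3⟩ := loopA lines (PySem.Dict.ofList [("2", 0), ("3", 0)])
  simp only [Spec_part_1, part_1, part_1_alt, h2, h3, loopB,
    show (PySem.Dict.ofList [("2", (0:Int)), ("3", 0)]).getD "2" 0 = 0 from rfl,
    show (PySem.Dict.ofList [("2", (0:Int)), ("3", 0)]).getD "3" 0 = 0 from rfl,
    zero_add]
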